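-- pv_equiv track=rewrite | github.com/paunchygent/skriptoteket | src/skriptoteket/script_bank/scripts/gruppgenerator.py | _pairs_for_groups
-- ===== SOURCE A (Python) =====
-- def _normalize_name(value: str) -> str:
--     return " ".join(value.strip().split())
--
-- def _dedupe_names(names: list[str]) -> list[str]:
--     seen: set[str] = set()
--     result: list[str] = []
--     for name in names:
--         cleaned = _normalize_name(name)
--         if not cleaned:
--             continue
--         key = cleaned.casefold()
--         if key in seen:
--             continue
--         seen.add(key)
--         result.append(cleaned)
--     return result
--
-- def _pairs_for_groups(groups: list[list[str]]) -> set[tuple[str, str]]: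
--     pairs: set[tuple[str, str]] = set()
--     for group in groups:
--         cleaned = _dedupe_names(group)
--         for idx, name in enumerate(cleaned):
--             for other in cleaned[idx + 1 :]:
--                 a, b = sorted((name.casefold(), other.casefold()))
--                 pairs.add((a, b))
--     return pairs
-- ===== SOURCE B (Python) =====
-- def _pairs_for_groups(groups):
--     pairs = set()
--     for group in groups:
--         keys = list(dict.fromkeys(
--             k for k in (" ".join(name.strip().split()).casefold() for name in group) if k
--         ))
--         while keys:
--             a = keys.pop(0)
--             for b in keys:
--                 pairs.add((a, b) if a <= b else (b, a))
--     return pairs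
-- ===== Notes on version B (the rewrite author's own statement) =====
-- stated objective: simpler
-- what changed: B drops the _dedupe_names two-form (seen-keys + cleaned-names) bookkeeping: it casefolds each name exactly once into a key list deduplicated via dict.fromkeys, then emits canonical pairs by a head-and-tail pop loop with a min/max comparison instead of enumerate+slice with a per-pair casefold and sorted() call.
import Mathlib
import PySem

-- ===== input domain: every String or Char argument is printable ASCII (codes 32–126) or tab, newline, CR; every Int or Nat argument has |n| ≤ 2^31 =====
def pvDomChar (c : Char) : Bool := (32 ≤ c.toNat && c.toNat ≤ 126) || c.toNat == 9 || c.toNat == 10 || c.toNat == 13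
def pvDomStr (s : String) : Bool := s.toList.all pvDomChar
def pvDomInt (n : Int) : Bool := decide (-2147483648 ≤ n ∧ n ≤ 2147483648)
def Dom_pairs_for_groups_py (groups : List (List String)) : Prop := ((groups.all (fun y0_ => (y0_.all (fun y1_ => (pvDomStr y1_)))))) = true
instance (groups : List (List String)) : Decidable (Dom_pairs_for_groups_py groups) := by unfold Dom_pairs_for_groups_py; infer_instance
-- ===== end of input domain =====

-- B replaces A's _dedupe_names two-form (seen keys + cleaned names) bookkeeping and the
-- enumerate/slice pair loop with per-pair casefold+sorted() by: one casefolded key per name,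
-- deduplicated with dict.fromkeys, and a head-and-tail pop loop emitting min/max pairs (simpler).
-- str.casefold is ported as PySem.Str.lower: exact on the ASCII domain Dom_pairs_for_groups_py.

-- ===== PORT A =====
def normalize_name_py (value : String) : String :=
  PySem.Str.join " " (PySem.Str.split₀ (PySem.Str.strip value))

def dedupe_names_py (names : List String) : List String :=
  (names.foldl (fun (st : PySem.Set String × List String) name =>
      let cleaned := normalize_name_py name
      if cleaned = "" then st
      else
        let key := PySem.Str.lower cleaned
        if PySem.Set.contains st.1 key then st
        else (PySem.Set.add st.1 key, st.2 ++ [cleaned]))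
    (PySem.Set.empty, [])).2

def pairs_for_groups_py (groups : List (List String)) : List (String × String) :=
  groups.foldl (fun pairs group =>
      let cleaned := dedupe_names_py group
      (PySem.List.enumerate cleaned).foldl (fun pairs ix =>
          (PySem.List.slice cleaned (some (ix.1 + 1))).foldl (fun pairs other =>
              let a := PySem.Str.lower ix.2
              let b := PySem.Str.lower other
              -- a, b = sorted((name.casefold(), other.casefold()))
              PySem.Set.add pairs (if b < a then (b, a) else (a, b)))
            pairs)
        pairs)
    PySem.Set.empty

-- ===== PORT B =====
def pvKey (name : String) : String :=
  PySem.Str.lower (PySem.Str.join " " (PySem.Str.split₀ (PySem.Str.strip name)))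

def pvEmitPairs (keys : List String) (pairs : PySem.Set (String × String)) :
    PySem.Set (String × String) :=
  match keys with
  | [] => pairs
  | a :: rest =>
      pvEmitPairs rest
        (rest.foldl (fun p b => PySem.Set.add p (if a ≤ b then (a, b) else (b, a))) pairs)

def pairs_for_groups_py_alt (groups : List (List String)) : List (String × String) :=
  groups.foldl (fun pairs group =>
      pvEmitPairs (PySem.List.dedup ((group.map pvKey).filter (fun k => k ≠ ""))) pairs)
    PySem.Set.empty

-- ===== PRECONDITION & SPEC =====
def Spec_pairs_for_groups_py (groups : List (List String)) (out : List (String × String)) : Prop := out = pairs_for_groups_py_alt groups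
instance (groups : List (List String)) (out : List (String × String)) : Decidable (Spec_pairs_for_groups_py groups out) := by unfold Spec_pairs_for_groups_py; infer_instance

-- ===== CLAIM (what is proved, stated in full; the proofs are below) =====
def Claim_equal_pairs_for_groups_py : Prop := ∀ (groups : List (List String)), Dom_pairs_for_groups_py groups → Spec_pairs_for_groups_py groups (pairs_for_groups_py groups)

-- ===== LEMMAS AND PROOFS =====

theorem lower_eq_empty_iff (s : String) : PySem.Str.lower s = "" ↔ s = "" := by
  constructor
  · intro h
    have h2 : (PySem.Str.lower s).toList = ([] : List Char) := by rw [h]; rfl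
    rw [PySem.Str.toList_lower] at h2
    simp [PySem.Chars.lower] at h2
    exact String.toList_inj.mp (by simpa using h2)
  · rintro rfl; rfl

theorem dedupe_fold (names : List String) : ∀ (seen : PySem.Set String) (result : List String),
    result.map PySem.Str.lower = seen →
    ((names.foldl (fun (st : PySem.Set String × List String) name =>
      let cleaned := normalize_name_py name
      if cleaned = "" then st
      else
        let key := PySem.Str.lower cleaned
        if PySem.Set.contains st.1 key then st
        else (PySem.Set.add st.1 key, st.2 ++ [cleaned])) (seen, result)).2).map PySem.Str.lower
      = ((names.map pvKey).filter (fun k => k ≠ "")).foldl PySem.Set.add seen := by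
  induction names with
  | nil => intro seen result h; simpa using h
  | cons n t ih =>
    intro seen result h
    simp only [List.foldl_cons, List.map_cons]
    by_cases hc : normalize_name_py n = ""
    · have hk : pvKey n = "" := by
        show PySem.Str.lower (normalize_name_py n) = ""
        rw [hc]; rfl
      rw [List.filter_cons_of_neg (by simp [hk]), if_pos hc]
      exact ih seen result h
    · have hk : pvKey n ≠ "" := by
        show PySem.Str.lower (normalize_name_py n) ≠ ""
        simpa [lower_eq_empty_iff] using hc
      rw [List.filter_cons_of_pos (by simp [hk]), List.foldl_cons, if_neg hc]
      by_cases hm : PySem.Set.contains seen (PySem.Str.lower (normalize_name_py n))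
      · have hadd : PySem.Set.add seen (pvKey n) = seen := by
          have hm' : List.contains seen (PySem.Str.lower (normalize_name_py n)) = true := hm
          simp only [PySem.Set.add, show pvKey n = PySem.Str.lower (normalize_name_py n) from rfl,
            PySem.Set.contains]
          rw [if_pos hm']
        rw [if_pos hm, hadd]
        exact ih seen result h
      · have h2 : (result ++ [normalize_name_py n]).map PySem.Str.lower
            = PySem.Set.add seen (PySem.Str.lower (normalize_name_py n)) := by
          have hm' : ¬ List.contains seen (PySem.Str.lower (normalize_name_py n)) = true := hm
          simp only [PySem.Set.add, PySem.Set.contains, List.map_append, List.map_cons,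
            List.map_nil, h]
          rw [if_neg hm']
        rw [if_neg hm]
        exact ih _ _ h2

theorem loopA_eq (full : List String) : ∀ (xs : List String) (k : Int), 0 ≤ k →
    List.drop k.toNat full = xs → ∀ pairs,
    (PySem.List.enumerate xs k).foldl (fun pairs ix =>
        (PySem.List.slice full (some (ix.1 + 1))).foldl (fun pairs other =>
            PySem.Set.add pairs
              (if PySem.Str.lower other < PySem.Str.lower ix.2
               then (PySem.Str.lower other, PySem.Str.lower ix.2)
               else (PySem.Str.lower ix.2, PySem.Str.lower other)))
          pairs)
      pairs
    = pvEmitPairs (xs.map PySem.Str.lower) pairs := by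
  intro xs
  induction xs with
  | nil => intro k hk hdrop pairs; simp [PySem.List.enumerate_nil, pvEmitPairs]
  | cons x t ih =>
    intro k hk hdrop pairs
    rw [PySem.List.enumerate_cons, List.foldl_cons]
    have h1 : PySem.List.slice full (some (k + 1)) = t := by
      rw [PySem.List.slice_from full (by omega : (0:Int) ≤ k + 1)]
      have h2 : (k + 1).toNat = k.toNat + 1 := by omega
      rw [h2, ← List.drop_drop, hdrop, List.drop_one, List.tail_cons]
    have hinner : ∀ p, t.foldl (fun pairs other =>
          PySem.Set.add pairs
            (if PySem.Str.lower other < PySem.Str.lower x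
             then (PySem.Str.lower other, PySem.Str.lower x)
             else (PySem.Str.lower x, PySem.Str.lower other))) p
        = (t.map PySem.Str.lower).foldl (fun p b =>
            PySem.Set.add p (if PySem.Str.lower x ≤ b then (PySem.Str.lower x, b)
                             else (b, PySem.Str.lower x))) p := by
      intro p
      rw [List.foldl_map]
      congr 1
      funext acc o
      by_cases hlt : PySem.Str.lower o < PySem.Str.lower x
      · rw [if_pos hlt, if_neg (not_le.mpr hlt)]
      · rw [if_neg hlt, if_pos (not_lt.mp hlt)]
    show (PySem.List.enumerate t (k + 1)).foldl _
        ((PySem.List.slice full (some (k + 1))).foldl _ pairs) = _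
    rw [h1, List.map_cons]
    show _ = pvEmitPairs (t.map PySem.Str.lower)
        ((t.map PySem.Str.lower).foldl _ pairs)
    rw [← hinner pairs]
    exact ih (k + 1) (by omega) (by
      have h2 : (k + 1).toNat = k.toNat + 1 := by omega
      rw [h2, ← List.drop_drop, hdrop, List.drop_one, List.tail_cons]) _

theorem dedupe_map_lower (g : List String) :
    (dedupe_names_py g).map PySem.Str.lower
      = PySem.List.dedup ((g.map pvKey).filter (fun k => k ≠ "")) := by
  unfold dedupe_names_py
  rw [dedupe_fold g PySem.Set.empty [] rfl]
  rw [PySem.List.dedup_eq_ofList, PySem.Set.ofList_eq_foldl]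
  rfl

-- ===== VERDICT (by name: the statement is the Claim_ definition above) =====
theorem pairs_for_groups_py_spec : Claim_equal_pairs_for_groups_py := by
  intro groups _
  show pairs_for_groups_py groups = pairs_for_groups_py_alt groups
  unfold pairs_for_groups_py pairs_for_groups_py_alt
  congr 1
  funext pairs group
  have h1 := loopA_eq (dedupe_names_py group) (dedupe_names_py group) 0 le_rfl rfl pairs
  rw [dedupe_map_lower] at h1
  exact h1
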